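-- pv_equiv track=rewrite | github.com/Ford-z/LeetCode | 1451 重新排列句子中的单词.py | arrangeWords
-- ===== SOURCE A (Python) =====
-- def arrangeWords(text: str) -> str:
--     a=list(text.split(" "))
--     t=[]
--     t.append(a[0][0].swapcase())
--     for i in range(len(a[0])):
--         if(i!=0):
--             t.append(a[0][i])
--     a[0]="".join(t)
--     a.sort(key = lambda i:len(i)) #按照字符长度排序
--     t=[]
--     t.append(a[0][0].swapcase())
--     for i in range(len(a[0])):
--         if(i!=0):
--             t.append(a[0][i])
--     a[0]="".join(t)
--     ans=" ".join(a)
--     return ans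
-- ===== SOURCE B (Python) =====
-- def arrangeWords(text: str) -> str:
--     words = text.split(" ")
--     words[0] = words[0][0].swapcase() + words[0][1:]
--     buckets = {}
--     for w in words:
--         buckets.setdefault(len(w), []).append(w)
--     maxlen = max(len(w) for w in words)
--     ordered = []
--     for L in range(maxlen + 1):
--         ordered.extend(buckets.get(L, []))
--     ordered[0] = ordered[0][0].swapcase() + ordered[0][1:]
--     return " ".join(ordered)
-- ===== Notes on version B (the rewrite author's own statement) =====
-- stated objective: alternative
-- what changed: Replaces the stable comparison sort by length (list.sort(key=len)) with a counting/bucket sort: words are appended in original order to a dict of length-indexed buckets and the ordered list is rebuilt by walking lengths 0..max; the two character-copying loops become direct swapcase-head slicing.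
-- outside the precondition, e.g. on arrangeWords(' '): A raises IndexError, B raises IndexError
import Mathlib
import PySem

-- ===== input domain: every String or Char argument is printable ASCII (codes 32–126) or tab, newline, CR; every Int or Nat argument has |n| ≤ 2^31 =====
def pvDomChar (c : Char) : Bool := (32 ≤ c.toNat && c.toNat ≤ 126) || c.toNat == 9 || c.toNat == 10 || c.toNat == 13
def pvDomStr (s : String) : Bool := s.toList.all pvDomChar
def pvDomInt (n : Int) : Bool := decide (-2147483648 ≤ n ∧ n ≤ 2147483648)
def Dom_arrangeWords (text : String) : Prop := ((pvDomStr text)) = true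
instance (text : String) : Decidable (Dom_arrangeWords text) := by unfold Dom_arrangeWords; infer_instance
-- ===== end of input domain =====

-- B replaces A's stable comparison sort by length with a bucket (counting) sort over a
-- length-indexed dict, and the char-copying loops with direct head-swapcase slicing.

-- str.swapcase() of a single character, exact on the ASCII domain
def pvSwapChar (c : Char) : Char :=
  if PySem.Chars.isupper c then PySem.Chars.lowerChar c
  else if PySem.Chars.islower c then PySem.Chars.upperChar c
  else c

-- ===== PORT A =====
-- t=[]; t.append(w[0].swapcase()); for i in range(len(w)): if i!=0: t.append(w[i]); "".join(t)
-- (w[0] is in range under Pre_, so pyGetD's default is never read)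
def pvRecap (w : List Char) : List Char :=
  let t := [pvSwapChar (PySem.List.pyGetD w 0 ' ')]
  (PySem.List.pyRange 0 (w.length : Int)).foldl
    (fun t i => if i ≠ 0 then t ++ [PySem.List.pyGetD w i ' '] else t) t

def arrangeWords (text : String) : String :=
  let a := PySem.Chars.splitOn text.toList [' ']
  let a := a.set 0 (pvRecap (a.headD []))
  let a := PySem.List.sorted a (fun w => (w.length : Int)) false
  let a := a.set 0 (pvRecap (a.headD []))
  String.ofList (PySem.Chars.join [' '] a)

-- ===== PORT B =====
-- w[0].swapcase() + w[1:]  (the empty word, on which Python raises, is outside Pre_)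
def pvSwapFirst (w : List Char) : List Char :=
  match w with
  | [] => []
  | c :: cs => pvSwapChar c :: cs

def arrangeWords_alt (text : String) : String :=
  let ws := PySem.Chars.splitOn text.toList [' ']
  let ws := ws.set 0 (pvSwapFirst (ws.headD []))
  let buckets := ws.foldl (fun d w => d.modify (w.length : Int) [] (· ++ [w])) PySem.Dict.empty
  let maxlen := PySem.List.maxD (ws.map (fun w => (w.length : Int))) (fun x => x) 0
  let ordered := (PySem.List.pyRange 0 (maxlen + 1)).foldl (fun acc L => acc ++ buckets.getD L []) []
  let ordered := ordered.set 0 (pvSwapFirst (ordered.headD []))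
  String.ofList (PySem.Chars.join [' '] ordered)

-- ===== PRECONDITION & SPEC =====
-- Pre_ excludes exactly the inputs on which Python A raises IndexError: a word of
-- text.split(" ") is empty (empty text, leading/trailing space, or two adjacent spaces).
def Pre_arrangeWords (text : String) : Prop :=
  ∀ w ∈ PySem.Chars.splitOn text.toList [' '], w ≠ []
instance (text : String) : Decidable (Pre_arrangeWords text) := by
  unfold Pre_arrangeWords; infer_instance

def pvWitness_arrangeWords : String := "Cats and dog"

def Spec_arrangeWords (text : String) (out : String) : Prop := out = arrangeWords_alt text
instance (text : String) (out : String) : Decidable (Spec_arrangeWords text out) := by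
  unfold Spec_arrangeWords; infer_instance

-- ===== CLAIM (what is proved, stated in full; the proofs are below) =====
def Claim_equal_arrangeWords : Prop :=
  ∀ (text : String), Dom_arrangeWords text → Pre_arrangeWords text →
    Spec_arrangeWords text (arrangeWords text)

-- ===== LEMMAS AND PROOFS =====

-- A's char-copying loop computes exactly B's swapcase-head slicing, on nonempty words.
theorem pvRecap_eq_swapFirst (w : List Char) (hw : w ≠ []) : pvRecap w = pvSwapFirst w := by
  obtain ⟨c, cs, rfl⟩ := List.exists_cons_of_ne_nil hw
  show ((PySem.List.pyRange 0 ((cs.length + 1 : Nat) : Int)).foldl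
      (fun t i => if i ≠ 0 then t ++ [PySem.List.pyGetD (c :: cs) i ' '] else t)
      [pvSwapChar (PySem.List.pyGetD (c :: cs) 0 ' ')]) = pvSwapChar c :: cs
  have hcs : (List.range cs.length).map (fun k => PySem.List.pyGetD cs ((k : Nat) : Int) ' ') = cs := by
    have h := PySem.List.map_pyGetD_pyRange_zero cs ' '
    rw [show PySem.List.len cs = ((cs.length : Nat) : Int) from rfl,
        PySem.List.pyRange_zero_natCast, List.map_map] at h
    exact h
  rw [show ((cs.length + 1 : Nat) : Int) = (((cs.length + 1 : Nat) : Nat) : Int) by push_cast; ring,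
      PySem.List.pyRange_zero_natCast, List.foldl_map, List.range_succ_eq_map]
  simp only [List.foldl_cons, Nat.cast_zero, ne_eq, not_true_eq_false, if_false,
    List.foldl_map]
  have hstep : ∀ (t : List Char) (k : Nat),
      (if ((k + 1 : Nat) : Int) ≠ 0 then t ++ [PySem.List.pyGetD (c :: cs) ((k + 1 : Nat) : Int) ' '] else t)
        = t ++ [PySem.List.pyGetD cs ((k : Nat) : Int) ' '] := by
    intro t k
    rw [if_pos (by positivity), PySem.List.pyGetD_natCast, PySem.List.pyGetD_natCast,
        List.getD_cons_succ]
  simp only [hstep]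
  rw [PySem.List.foldl_append_eq_flatMap]
  have hfm : ∀ (l : List Nat), l.flatMap (fun k => [PySem.List.pyGetD cs ((k : Nat) : Int) ' '])
      = l.map (fun k => PySem.List.pyGetD cs ((k : Nat) : Int) ' ') := by
    intro l; induction l with
    | nil => rfl
    | cons a l ih => simp only [List.flatMap_cons, List.map_cons, ih, List.singleton_append]
  rw [hfm, hcs]
  simp [PySem.List.pyGetD, PySem.List.pyGet?, PySem.List.pyIdx?]

-- the bucket dict built by B's first loop, read back at key L
theorem pvBuckets_getD (ws : List (List Char)) (L : Int) :
    (ws.foldl (fun d w => d.modify ((w.length : Nat) : Int) [] (· ++ [w])) PySem.Dict.empty).getD L []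
      = ws.filter (fun w => ((w.length : Nat) : Int) == L) := by
  have h := PySem.Dict.getD_foldl_modify_append
    (ws.map (fun w => (((w.length : Nat) : Int), w))) (PySem.Dict.empty) L
  rw [List.foldl_map] at h
  simp only [List.filter_map, List.map_map] at h
  rw [h]
  simp [PySem.Dict.getD, PySem.Dict.get?, PySem.Dict.empty, Function.comp_def]

-- stable insertion into a key-split list
theorem pvInsertBy_middle {α : Type} (key : α → Int) (x : α) (A B : List α)
    (hA : ∀ a ∈ A, key a ≤ key x) (hB : ∀ b ∈ B, key x < key b) :
    PySem.List.insertBy (fun a b => decide (key a < key b)) x (A ++ B) = A ++ x :: B := by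
  have ibn : ∀ (bef : α → α → Bool) (z : α), PySem.List.insertBy bef z [] = [z] := by
    intro bef z; simp [PySem.List.insertBy]
  have ibc : ∀ (bef : α → α → Bool) (z y : α) (ys : List α),
      PySem.List.insertBy bef z (y :: ys)
        = if bef z y then z :: y :: ys else y :: PySem.List.insertBy bef z ys := by
    intro bef z y ys; simp [PySem.List.insertBy]
  induction A with
  | nil =>
    cases B with
    | nil => simp [ibn]
    | cons b B' => simp [ibc, hB b (by simp)]
  | cons a A' ih =>
    have hle : ¬ key x < key a := not_lt.2 (hA a (by simp))
    rw [List.cons_append, ibc, if_neg (by simpa using hle), List.cons_append]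
    exact congrArg _ (ih (fun a' ha' => hA a' (by simp [ha'])))

-- Python's stable sort by length IS the concatenation of the length buckets in increasing order
theorem pvSorted_eq_buckets (ws : List (List Char)) (M : Nat) (h : ∀ w ∈ ws, w.length ≤ M) :
    PySem.List.sorted ws (fun w => (w.length : Int)) false
      = (List.range (M + 1)).flatMap (fun L => ws.filter (fun w => w.length == L)) := by
  induction ws using List.reverseRecOn with
  | nil => simp [PySem.List.sorted]
  | append_singleton ws x ih =>
    have hk : x.length ≤ M := h x (by simp)
    have hws : ∀ w ∈ ws, w.length ≤ M := fun w hw => h w (by simp [hw])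
    have hsort : PySem.List.sorted (ws ++ [x]) (fun w => ((w.length : Nat) : Int)) false
        = PySem.List.insertBy
            (fun a b => decide (((a.length : Nat) : Int) < ((b.length : Nat) : Int))) x
            (PySem.List.sorted ws (fun w => ((w.length : Nat) : Int)) false) := by
      simp [PySem.List.sorted, List.foldl_append]
    rw [hsort, ih hws]
    have hsplit : List.range (M + 1)
        = List.range (x.length + 1)
          ++ (List.range (M - x.length)).map (fun j => (x.length + 1) + j) := by
      rw [← List.range_add]; congr 1; omega
    rw [hsplit]
    simp only [List.flatMap_append, List.flatMap_map]
    have hA : ∀ a ∈ (List.range (x.length + 1)).flatMap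
        (fun L => ws.filter (fun w => w.length == L)),
        ((a.length : Nat) : Int) ≤ ((x.length : Nat) : Int) := by
      intro a ha
      rw [List.mem_flatMap] at ha
      obtain ⟨L, hL, ha⟩ := ha
      rw [List.mem_range] at hL
      rw [List.mem_filter, beq_iff_eq] at ha
      have : a.length ≤ x.length := by omega
      exact_mod_cast this
    have hB : ∀ b ∈ (List.range (M - x.length)).flatMap
        (fun j => ws.filter (fun w => w.length == (x.length + 1) + j)),
        ((x.length : Nat) : Int) < ((b.length : Nat) : Int) := by
      intro b hb
      rw [List.mem_flatMap] at hb
      obtain ⟨j, hj, hb⟩ := hb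
      rw [List.mem_filter, beq_iff_eq] at hb
      have : x.length < b.length := by omega
      exact_mod_cast this
    rw [pvInsertBy_middle (fun w => ((w.length : Nat) : Int)) x _ _ hA hB]
    have h2 : ∀ j : Nat, (ws ++ [x]).filter (fun w => w.length == (x.length + 1) + j)
        = ws.filter (fun w => w.length == (x.length + 1) + j) := by
      intro j
      rw [List.filter_append]
      have hne : (x.length == (x.length + 1) + j) = false := by
        simp only [beq_eq_false_iff_ne, ne_eq]; omega
      simp [hne]
    have h1 : (List.range (x.length + 1)).flatMap
          (fun L => (ws ++ [x]).filter (fun w => w.length == L))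
        = (List.range (x.length + 1)).flatMap
            (fun L => ws.filter (fun w => w.length == L)) ++ [x] := by
      rw [List.range_succ, List.flatMap_append, List.flatMap_append]
      have hsm : ∀ L ∈ List.range x.length,
          (fun L => (ws ++ [x]).filter (fun w => w.length == L)) L
            = (fun L => ws.filter (fun w => w.length == L)) L := by
        intro L hL
        rw [List.mem_range] at hL
        show (ws ++ [x]).filter (fun w => w.length == L) = ws.filter (fun w => w.length == L)
        rw [List.filter_append]
        have hne : (x.length == L) = false := by
          simp only [beq_eq_false_iff_ne, ne_eq]; omega
        simp [hne]
      rw [List.flatMap_def, List.map_congr_left hsm, ← List.flatMap_def]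
      simp
    simp only [h1, h2]
    simp [List.append_assoc]

theorem pvSplitOnGo_ne_nil (sep : List Char) : ∀ (fuel : Nat) (l cur : List Char)
    (acc : List (List Char)), PySem.Chars.splitOn.go sep fuel l cur acc ≠ [] := by
  intro fuel
  induction fuel with
  | zero => intro l cur acc; simp [PySem.Chars.splitOn.go]
  | succ n ih =>
    intro l cur acc
    cases l with
    | nil => simp [PySem.Chars.splitOn.go]
    | cons c rest =>
      simp only [PySem.Chars.splitOn.go]
      split
      · exact ih _ _ _
      · exact ih _ _ _

theorem pvSplitOn_ne_nil (cs sep : List Char) : PySem.Chars.splitOn cs sep ≠ [] := by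
  simp only [PySem.Chars.splitOn]
  exact pvSplitOnGo_ne_nil sep _ cs [] []

-- ===== VERDICT (by name: the statement is the Claim_ definition above) =====
theorem arrangeWords_spec : Claim_equal_arrangeWords := by
  intro text _ hpre
  unfold Pre_arrangeWords at hpre
  show arrangeWords text = arrangeWords_alt text
  obtain ⟨h0, t0, hsplit⟩ : ∃ h0 t0, PySem.Chars.splitOn text.toList [' '] = h0 :: t0 := by
    cases hs : PySem.Chars.splitOn text.toList [' '] with
    | nil => exact absurd hs (pvSplitOn_ne_nil _ _)
    | cons a l => exact ⟨a, l, rfl⟩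
  rw [hsplit] at hpre
  have hh0 : h0 ≠ [] := hpre h0 (by simp)
  simp only [arrangeWords, arrangeWords_alt, hsplit, List.headD_cons, List.set_cons_zero]
  rw [pvRecap_eq_swapFirst h0 hh0]
  set ws1 : List (List Char) := pvSwapFirst h0 :: t0 with hws1
  have hall : ∀ w ∈ ws1, w ≠ [] := by
    intro w hw
    rw [hws1, List.mem_cons] at hw
    rcases hw with rfl | hw
    · obtain ⟨c, cs, rfl⟩ := List.exists_cons_of_ne_nil hh0
      simp [pvSwapFirst]
    · exact hpre w (List.mem_cons_of_mem _ hw)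
  cases hmax : PySem.List.max? (ws1.map (fun w => ((w.length : Nat) : Int))) (fun x => x) with
  | none =>
    rw [PySem.List.max?_eq_none_iff] at hmax
    simp [hws1] at hmax
  | some m =>
    have hmem := PySem.List.max?_mem hmax
    rw [List.mem_map] at hmem
    obtain ⟨w0, hw0, rfl⟩ := hmem
    have hbound : ∀ w ∈ ws1, w.length ≤ w0.length := by
      intro w hw
      have hle := PySem.List.max?_isMax hmax _ (List.mem_map_of_mem hw)
      exact_mod_cast hle
    rw [show PySem.List.maxD (ws1.map (fun w => ((w.length : Nat) : Int))) (fun x => x) 0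
          = ((w0.length : Nat) : Int) by simp [PySem.List.maxD, hmax]]
    rw [show ((w0.length : Nat) : Int) + 1 = ((w0.length + 1 : Nat) : Int) by push_cast; ring]
    rw [PySem.List.pyRange_zero_natCast, PySem.List.foldl_append_eq_flatMap, List.nil_append,
        List.flatMap_map]
    have hbk : ∀ L : Nat,
        (ws1.foldl (fun d w => d.modify ((w.length : Nat) : Int) [] (· ++ [w]))
            PySem.Dict.empty).getD ((L : Nat) : Int) []
          = ws1.filter (fun w => w.length == L) := by
      intro L
      rw [pvBuckets_getD]
      apply List.filter_congr
      intro w _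
      by_cases hwl : w.length = L
      · simp [hwl]
      · simp [hwl]
    simp only [hbk]
    rw [pvSorted_eq_buckets ws1 w0.length hbound]
    set R := (List.range (w0.length + 1)).flatMap (fun L => ws1.filter (fun w => w.length == L))
      with hR
    have hRne : R ≠ [] := by
      have hmemR : w0 ∈ R := by
        rw [hR, List.mem_flatMap]
        exact ⟨w0.length, by simp, List.mem_filter.2 ⟨hw0, by simp⟩⟩
      intro hnil
      rw [hnil] at hmemR
      simp at hmemR
    obtain ⟨r, rs, hRcons⟩ := List.exists_cons_of_ne_nil hRne
    have hrne : r ≠ [] := by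
      apply hall r
      have hrR : r ∈ R := by rw [hRcons]; simp
      rw [hR, List.mem_flatMap] at hrR
      obtain ⟨L, _, hr⟩ := hrR
      exact (List.mem_filter.1 hr).1
    rw [hRcons, List.headD_cons, pvRecap_eq_swapFirst r hrne]
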